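-- pv_equiv track=rewrite | github.com/tevansuk/aoc-2021 | aoc/seventeen.py | find_y_steps
-- ===== SOURCE A (Python) =====
-- from collections import defaultdict
--
-- TargetSteps = defaultdict[int, set[int]]
--
-- def find_y_steps(ymin: int, ymax: int) -> TargetSteps:
--     y_steps = TargetSteps(set)
--     for yspeed in range(ymin, abs(ymin + ymax)):
--         dy = yspeed
--         cy = 0
--         step = 0
--         while True:
--             if ymin <= cy <= ymax:
--                 y_steps[step].add(yspeed)
--             elif cy < ymin:
--                 break
--             cy += dy
--             dy -= 1
--             step += 1
--     return y_steps
-- ===== SOURCE B (Python) =====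
-- from collections import defaultdict
--
-- TargetSteps = defaultdict[int, set[int]]
--
-- def find_y_steps(ymin: int, ymax: int) -> TargetSteps:
--     # Closed form: the position after s steps at initial velocity v is s*v - s*(s-1)//2.
--     # It rises until s = max(v,0)+1 ("peak") and falls afterwards, so per velocity the
--     # in-band steps are range(0, a) (rising edge) plus range(b, s0) (falling edge), with
--     # the three boundaries found by exponential + binary search instead of simulation.
--     y_steps = TargetSteps(set)
--     if ymin > 0:
--         # the probe starts at 0, below the whole band: it is cut off at step 0
--         return y_steps
--     for v in range(ymin, abs(ymin + ymax)):
--         m = v if v > 0 else 0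
--         peak = m + 1
--         # exponential search: some step hi at or past which the probe is below the band
--         hi = peak + 1
--         while hi * v - hi * (hi - 1) // 2 >= ymin:
--             hi = peak + 2 * (hi - peak)
--         # s0 = first step with position < ymin
--         lo = peak
--         while lo < hi:
--             s = (lo + hi) // 2
--             if s * v - s * (s - 1) // 2 < ymin: hi = s
--             else: lo = s + 1
--         s0 = lo
--         # a = first step on the rising edge with position > ymax (peak if none)
--         lo, hi = 0, peak
--         while lo < hi:
--             s = (lo + hi) // 2
--             if s * v - s * (s - 1) // 2 > ymax: hi = s
--             else: lo = s + 1
--         a = lo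
--         # b = first step on the falling edge with position back down to <= ymax
--         lo, hi = peak, s0
--         while lo < hi:
--             s = (lo + hi) // 2
--             if s * v - s * (s - 1) // 2 <= ymax: hi = s
--             else: lo = s + 1
--         b = lo
--         for s in range(a):
--             y_steps[s].add(v)
--         for s in range(b, s0):
--             y_steps[s].add(v)
--     return y_steps
-- ===== Notes on version B (the rewrite author's own statement) =====
-- stated objective: faster
-- what changed: Instead of simulating the probe step by step for every velocity, B uses the closed-form position s*v - s*(s-1)//2 and per velocity finds the three in-band boundaries (band exit on the rising edge, re-entry and drop-out on the falling edge) by exponential plus binary search, emitting the two in-band step ranges directly.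
import Mathlib
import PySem

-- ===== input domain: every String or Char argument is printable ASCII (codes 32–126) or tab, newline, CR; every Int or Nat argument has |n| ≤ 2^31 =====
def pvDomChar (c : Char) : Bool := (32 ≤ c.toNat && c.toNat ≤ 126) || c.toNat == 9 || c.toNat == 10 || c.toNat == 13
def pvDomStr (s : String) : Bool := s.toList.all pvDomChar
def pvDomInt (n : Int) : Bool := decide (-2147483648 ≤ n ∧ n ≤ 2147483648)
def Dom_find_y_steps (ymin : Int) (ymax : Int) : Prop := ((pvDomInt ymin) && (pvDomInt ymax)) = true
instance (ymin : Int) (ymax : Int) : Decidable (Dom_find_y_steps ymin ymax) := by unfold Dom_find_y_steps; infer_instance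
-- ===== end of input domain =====

-- B replaces A's per-velocity step-by-step simulation by the closed-form position
-- s*v - s*(s-1)//2 with binary searches for the in-band step boundaries (measured faster).


-- ===== PORT A =====
-- y_steps[step].add(yspeed) on the defaultdict(set)
def pvUpd (d : PySem.Dict Int (PySem.Set Int)) (step v : Int) : PySem.Dict Int (PySem.Set Int) :=
  d.modify step PySem.Set.empty (fun st => PySem.Set.add st v)

-- the 'while True' body; fuel only makes the recursion total (proved sufficient below)
def pvLoopA (ymin ymax yspeed : Int) : Nat → Int → Int → Int → PySem.Dict Int (PySem.Set Int) → PySem.Dict Int (PySem.Set Int)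
  | 0, _, _, _, d => d
  | fuel+1, dy, cy, step, d =>
    if ymin ≤ cy ∧ cy ≤ ymax then
      pvLoopA ymin ymax yspeed fuel (dy - 1) (cy + dy) (step + 1) (pvUpd d step yspeed)
    else if cy < ymin then d
    else pvLoopA ymin ymax yspeed fuel (dy - 1) (cy + dy) (step + 1) d

def pvFuelA (ymin yspeed : Int) : Nat := (2 * max yspeed 0 - ymin + 4).toNat

def find_y_steps (ymin : Int) (ymax : Int) : List (Int × List Int) :=
  ((PySem.List.pyRange ymin |ymin + ymax| 1).foldl
    (fun d yspeed => pvLoopA ymin ymax yspeed (pvFuelA ymin yspeed) yspeed 0 0 d)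
    PySem.Dict.empty).items

-- ===== PORT B =====
-- closed-form position after s steps (Source B's _pos)
def pvPos (v s : Int) : Int := s * v - PySem.Int.floordiv (s * (s - 1)) 2

-- Source B's exponential-search loop: doubles the window past peak until pred holds; fuel only makes it total
def pvGallop (pred : Int → Bool) (peak : Int) : Nat → Int → Int
  | 0, hi => hi
  | fuel+1, hi => if pred hi then hi else pvGallop pred peak fuel (peak + 2 * (hi - peak))

-- Source B's three binary-search loops: first s in [lo, hi) with pred(s), hi if none; fuel only makes them total
def pvFirst (pred : Int → Bool) : Nat → Int → Int → Int
  | 0, lo, _ => lo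
  | fuel+1, lo, hi =>
    if lo < hi then
      let mid := PySem.Int.floordiv (lo + hi) 2
      if pred mid then pvFirst pred fuel lo mid else pvFirst pred fuel (mid + 1) hi
    else lo

-- body of B's 'for v in range(...)' loop
def pvBStep (ymin ymax : Int) (d : PySem.Dict Int (PySem.Set Int)) (v : Int) : PySem.Dict Int (PySem.Set Int) :=
  let peak := max v 0 + 1
  let hi := pvGallop (fun s => decide (pvPos v s < ymin)) peak (2 * max v 0 - ymin + 3).toNat (peak + 1)
  let s0 := pvFirst (fun s => decide (pvPos v s < ymin)) (hi - peak).toNat peak hi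
  let a := pvFirst (fun s => decide (ymax < pvPos v s)) (peak - 0).toNat 0 peak
  let b := pvFirst (fun s => decide (pvPos v s ≤ ymax)) (s0 - peak).toNat peak s0
  let d1 := (PySem.List.pyRange 0 a 1).foldl (fun d s => pvUpd d s v) d
  (PySem.List.pyRange b s0 1).foldl (fun d s => pvUpd d s v) d1

def find_y_steps_alt (ymin : Int) (ymax : Int) : List (Int × List Int) :=
  if ymin > 0 then (PySem.Dict.empty : PySem.Dict Int (PySem.Set Int)).items
  else ((PySem.List.pyRange ymin |ymin + ymax| 1).foldl (pvBStep ymin ymax) PySem.Dict.empty).items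

-- ===== PRECONDITION & SPEC =====
def Spec_find_y_steps (ymin : Int) (ymax : Int) (out : List (Int × List Int)) : Prop := out = find_y_steps_alt ymin ymax
instance (ymin : Int) (ymax : Int) (out : List (Int × List Int)) : Decidable (Spec_find_y_steps ymin ymax out) := by unfold Spec_find_y_steps; infer_instance

-- ===== CLAIM (what is proved, stated in full; the proofs are below) =====
def Claim_equal_find_y_steps : Prop := ∀ (ymin : Int) (ymax : Int), Dom_find_y_steps ymin ymax → Spec_find_y_steps ymin ymax (find_y_steps ymin ymax)

-- ===== LEMMAS AND PROOFS =====

lemma pvPos_succ (v s : Int) : pvPos v (s + 1) = pvPos v s + (v - s) := by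
  unfold pvPos
  rw [PySem.Int.floordiv_eq_ediv_of_pos (h := by norm_num), PySem.Int.floordiv_eq_ediv_of_pos (h := by norm_num)]
  have h : (s + 1) * ((s + 1) - 1) = s * (s - 1) + s * 2 := by ring
  rw [h, Int.add_mul_ediv_right _ _ (by norm_num : (2:Int) ≠ 0)]
  ring
lemma pvPos_zero (v : Int) : pvPos v 0 = 0 := by
  unfold pvPos
  rw [PySem.Int.floordiv_eq_ediv_of_pos (h := by norm_num)]
  simp
lemma pvPos_asc (v s t : Int) (h0 : 0 ≤ s) (hst : s ≤ t) (ht : t ≤ max v 0) :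
    pvPos v s ≤ pvPos v t := by
  induction t, hst using Int.le_induction with
  | base => exact le_refl _
  | succ n hn ih =>
    have hn' : n + 1 ≤ max v 0 := ht
    have h1 : pvPos v n ≤ pvPos v (n + 1) := by
      rw [pvPos_succ]; omega
    exact le_trans (ih (by omega)) h1
lemma pvPos_desc (v s t : Int) (hs : max v 0 + 1 ≤ s) (hst : s ≤ t) :
    pvPos v t ≤ pvPos v s := by
  induction t, hst using Int.le_induction with
  | base => exact le_refl _
  | succ n hn ih =>
    have h1 : pvPos v (n + 1) ≤ pvPos v n := by
      rw [pvPos_succ]; omega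
    exact le_trans h1 ih
lemma pvPos_high (ymin v : Int) (hy : ymin ≤ 0) :
    pvPos v (2 * max v 0 - ymin + 3) < ymin := by
  set h := 2 * max v 0 - ymin + 3 with hh
  have hm : 0 ≤ max v 0 := le_max_right v 0
  have hv : v ≤ max v 0 := le_max_left v 0
  have hf : h * v - ymin + 1 ≤ PySem.Int.floordiv (h * (h - 1)) 2 := by
    rw [PySem.Int.le_floordiv_iff_mul_le (hb := by norm_num)]
    nlinarith [hm, hv, hy]
  unfold pvPos
  omega
lemma pvExistsPartition (pred : Int → Bool) : ∀ (n : Nat) (lo hi : Int), lo ≤ hi → (hi - lo).toNat ≤ n →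
    (∀ s t, lo ≤ s → s ≤ t → t < hi → pred s = true → pred t = true) →
    ∃ c, lo ≤ c ∧ c ≤ hi ∧ (∀ s, lo ≤ s → s < c → pred s = false) ∧
      (∀ s, c ≤ s → s < hi → pred s = true) := by
  intro n
  induction n with
  | zero =>
    intro lo hi hle hn _
    exact ⟨lo, le_refl _, hle, fun s h1 h2 => absurd (lt_of_le_of_lt h1 h2) (lt_irrefl _),
      fun s h1 h2 => absurd (lt_of_le_of_lt (by omega : lo ≤ s) h2) (by omega)⟩
  | succ n ih =>
    intro lo hi hle hn hmono
    by_cases heq : lo = hi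
    · exact ⟨lo, le_refl _, hle, fun s h1 h2 => by omega, fun s h1 h2 => by omega⟩
    · have hlt : lo < hi := lt_of_le_of_ne hle heq
      by_cases hp : pred lo = true
      · exact ⟨lo, le_refl _, hle, fun s h1 h2 => by omega,
          fun s h1 h2 => hmono lo s (le_refl _) h1 h2 hp⟩
      · obtain ⟨c, hc1, hc2, hc3, hc4⟩ := ih (lo + 1) hi (by omega) (by omega)
          (fun s t h1 h2 h3 => hmono s t (by omega) h2 h3)
        exact ⟨c, by omega, hc2,
          fun s h1 h2 => by
            rcases eq_or_lt_of_le h1 with h | h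
            · simpa [← h] using hp
            · exact hc3 s (by omega) h2,
          hc4⟩
-- the exponential search lands strictly past peak, on a step satisfying pred
lemma pvGallop_spec (pred : Int → Bool) (peak B0 : Int)
    (hB : ∀ s, B0 ≤ s → pred s = true) : ∀ (fuel : Nat) (hi : Int), peak < hi →
    (B0 - hi).toNat ≤ fuel →
    peak < pvGallop pred peak fuel hi ∧ pred (pvGallop pred peak fuel hi) = true := by
  intro fuel
  induction fuel with
  | zero =>
    intro hi h1 h2
    exact ⟨h1, hB hi (by omega)⟩
  | succ n ih =>
    intro hi h1 h2
    rw [pvGallop]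
    by_cases hp : pred hi = true
    · rw [if_pos hp]; exact ⟨h1, hp⟩
    · rw [if_neg hp]
      have hhi : hi < B0 := by
        by_contra hcon
        exact hp (hB hi (by omega))
      exact ih (peak + 2 * (hi - peak)) (by omega) (by omega)

lemma pvFirst_eq (pred : Int → Bool) (c : Int) : ∀ (fuel : Nat) (lo hi : Int),
    lo ≤ c → c ≤ hi → (hi - lo).toNat ≤ fuel →
    (∀ s, lo ≤ s → s < c → pred s = false) → (∀ s, c ≤ s → s < hi → pred s = true) →
    pvFirst pred fuel lo hi = c := by
  intro fuel
  induction fuel with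
  | zero => intro lo hi h1 h2 h3 _ _; simp [pvFirst]; omega
  | succ n ih =>
    intro lo hi h1 h2 h3 hlow hhigh
    rw [pvFirst]
    split_ifs with hlt
    · have hmid1 : lo ≤ PySem.Int.floordiv (lo + hi) 2 :=
        (PySem.Int.floordiv_two_mid_bounds (by omega)).1
      have hmid2 : PySem.Int.floordiv (lo + hi) 2 < hi := by
        rw [PySem.Int.floordiv_lt_iff_lt_mul (hb := by norm_num)]; omega
      set mid := PySem.Int.floordiv (lo + hi) 2 with hm
      show (if pred mid = true then pvFirst pred n lo mid else pvFirst pred n (mid + 1) hi) = c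
      split_ifs with hp
      · have hcm : c ≤ mid := by
          by_contra hcon
          rw [hlow mid hmid1 (by omega)] at hp; exact Bool.false_ne_true hp
        exact ih lo mid h1 hcm (by omega) hlow (fun s hs1 hs2 => hhigh s hs1 (by omega))
      · have hcm : mid < c := by
          by_contra hcon
          rw [hhigh mid (by omega) hmid2] at hp; exact hp rfl
        exact ih (mid + 1) hi (by omega) h2 (by omega)
          (fun s hs1 hs2 => hlow s (by omega) hs2) hhigh
    · omega
lemma pvLoopA_eq (ymin ymax v s0 : Int)
    (hbelow : pvPos v s0 < ymin) (habove : ∀ s, 0 ≤ s → s < s0 → ymin ≤ pvPos v s) :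
    ∀ (fuel : Nat) (s : Int) (d : PySem.Dict Int (PySem.Set Int)), 0 ≤ s → s ≤ s0 →
      (s0 - s).toNat < fuel →
    pvLoopA ymin ymax v fuel (v - s) (pvPos v s) s d
      = ((PySem.List.pyRange s s0 1).filter (fun t => decide (pvPos v t ≤ ymax))).foldl
          (fun d t => pvUpd d t v) d := by
  intro fuel
  induction fuel with
  | zero => intro s d _ _ h3; omega
  | succ n ih =>
    intro s d hs0 hss0 hfuel
    rcases eq_or_lt_of_le hss0 with heq | hlt
    · subst heq
      rw [pvLoopA, PySem.List.pyRange_one_eq_nil (le_refl _)]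
      have h1 : ¬ (ymin ≤ pvPos v s ∧ pvPos v s ≤ ymax) := by
        intro h; omega
      rw [if_neg h1, if_pos hbelow]
      simp
    · have hin : ymin ≤ pvPos v s := habove s hs0 hlt
      have hstep : pvPos v s + (v - s) = pvPos v (s + 1) := (pvPos_succ v s).symm
      have harith : v - s - 1 = v - (s + 1) := by ring
      rw [pvLoopA, PySem.List.pyRange_one_cons hlt]
      by_cases hmx : pvPos v s ≤ ymax
      · rw [if_pos ⟨hin, hmx⟩, harith, hstep]
        rw [List.filter_cons_of_pos (by simpa using hmx)]
        rw [List.foldl_cons]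
        exact ih (s + 1) (pvUpd d s v) (by omega) (by omega) (by omega)
      · rw [if_neg (by rintro ⟨_, h⟩; exact hmx h), if_neg (by omega), harith, hstep]
        rw [List.filter_cons_of_neg (by simpa using hmx)]
        exact ih (s + 1) d (by omega) (by omega) (by omega)
lemma pvBody_eq (ymin ymax v : Int) (hy : ymin ≤ 0) (d : PySem.Dict Int (PySem.Set Int)) :
    pvLoopA ymin ymax v (pvFuelA ymin v) v 0 0 d = pvBStep ymin ymax d v := by
  have hm : 0 ≤ max v 0 := le_max_right v 0
  set peak := max v 0 + 1 with hpeak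
  set high := 2 * max v 0 - ymin + 3 with hhigh
  have hph : peak ≤ high := by omega
  -- every step from high on is below the band
  have hB : ∀ s, high ≤ s → decide (pvPos v s < ymin) = true := by
    intro s hs
    have h1 : pvPos v s ≤ pvPos v high := pvPos_desc v high s (by omega) hs
    have h2 : pvPos v high < ymin := pvPos_high ymin v hy
    simp only [decide_eq_true_eq]; omega
  -- the exponential search yields a window end hiG past the break point
  obtain ⟨hgal1, hgal2⟩ := pvGallop_spec (fun s => decide (pvPos v s < ymin)) peak high hB
    high.toNat (peak + 1) (by omega) (by omega)
  set hiG := pvGallop (fun s => decide (pvPos v s < ymin)) peak high.toNat (peak + 1) with hhiG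
  -- partition point c1 : first step at or below which the probe is below the band
  obtain ⟨c1, hc11, hc12, hc13, hc14⟩ := pvExistsPartition
    (fun s => decide (pvPos v s < ymin)) (hiG - peak).toNat peak hiG (by omega) (by omega)
    (fun s t h1 h2 h3 hp => by
      simp only [decide_eq_true_eq] at hp ⊢
      exact lt_of_le_of_lt (pvPos_desc v s t h1 h2) hp)
  have hc1below : pvPos v c1 < ymin := by
    rcases eq_or_lt_of_le hc12 with h | h
    · rw [h]; simpa using hgal2
    · simpa using hc14 c1 (le_refl _) h
  have hc1high : c1 ≤ high := by
    by_contra hcon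
    have := hc13 high hph (by omega)
    rw [hB high (le_refl _)] at this
    simp at this
  have habove : ∀ s, 0 ≤ s → s < c1 → ymin ≤ pvPos v s := by
    intro s h0 hsc
    by_cases hsp : s < peak
    · have : pvPos v 0 ≤ pvPos v s := pvPos_asc v 0 s (le_refl _) h0 (by omega)
      rw [pvPos_zero] at this; omega
    · have := hc13 s (by omega) hsc; simp at this; omega
  -- partition point c2 : where the rising edge leaves the band upward
  obtain ⟨c2, hc21, hc22, hc23, hc24⟩ := pvExistsPartition
    (fun s => decide (ymax < pvPos v s)) peak.toNat 0 peak (by omega) (by omega)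
    (fun s t h1 h2 h3 hp => by
      simp only [decide_eq_true_eq] at hp ⊢
      exact lt_of_lt_of_le hp (pvPos_asc v s t h1 h2 (by omega)))
  -- partition point c3 : where the falling edge re-enters the band
  obtain ⟨c3, hc31, hc32, hc33, hc34⟩ := pvExistsPartition
    (fun s => decide (pvPos v s ≤ ymax)) (c1 - peak).toNat peak c1 hc11 (by omega)
    (fun s t h1 h2 h3 hp => by
      simp only [decide_eq_true_eq] at hp ⊢
      exact le_trans (pvPos_desc v s t h1 h2) hp)
  -- the three binary searches return the partition points
  have hs0 : pvFirst (fun s => decide (pvPos v s < ymin)) (hiG - peak).toNat peak hiG = c1 :=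
    pvFirst_eq _ c1 _ peak hiG hc11 hc12 (le_refl _) hc13 hc14
  have ha : pvFirst (fun s => decide (ymax < pvPos v s)) (peak - 0).toNat 0 peak = c2 :=
    pvFirst_eq _ c2 _ 0 peak hc21 hc22 (by omega) hc23 hc24
  have hb : pvFirst (fun s => decide (pvPos v s ≤ ymax)) (c1 - peak).toNat peak c1 = c3 :=
    pvFirst_eq _ c3 _ peak c1 hc31 hc32 (le_refl _) hc33 hc34
  -- A's loop, characterised
  have hL : pvLoopA ymin ymax v (pvFuelA ymin v) v 0 0 d
      = ((PySem.List.pyRange 0 c1 1).filter (fun t => decide (pvPos v t ≤ ymax))).foldl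
          (fun d t => pvUpd d t v) d := by
    have h0 : pvLoopA ymin ymax v (pvFuelA ymin v) (v - 0) (pvPos v 0) 0 d
        = ((PySem.List.pyRange 0 c1 1).filter (fun t => decide (pvPos v t ≤ ymax))).foldl
            (fun d t => pvUpd d t v) d :=
      pvLoopA_eq ymin ymax v c1 hc1below habove (pvFuelA ymin v) 0 d (le_refl _) (by omega)
        (by unfold pvFuelA; omega)
    rw [pvPos_zero] at h0
    simpa using h0
  -- the filtered range is the two emitted ranges
  have hsplit : PySem.List.pyRange 0 c1 1
      = PySem.List.pyRange 0 c2 1 ++ (PySem.List.pyRange c2 c3 1 ++ PySem.List.pyRange c3 c1 1) := by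
    rw [← PySem.List.pyRange_one_append c2 c3 c1 (by omega) hc32,
        ← PySem.List.pyRange_one_append 0 c2 c1 (by omega) (by omega)]
  have hf1 : (PySem.List.pyRange 0 c2 1).filter (fun t => decide (pvPos v t ≤ ymax))
      = PySem.List.pyRange 0 c2 1 := by
    rw [List.filter_eq_self]
    intro t ht
    rw [PySem.List.mem_pyRange_one] at ht
    have := hc23 t ht.1 ht.2
    simp at this ⊢; omega
  have hf2 : (PySem.List.pyRange c2 c3 1).filter (fun t => decide (pvPos v t ≤ ymax)) = [] := by
    rw [List.filter_eq_nil_iff]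
    intro t ht
    rw [PySem.List.mem_pyRange_one] at ht
    by_cases htp : t < peak
    · have := hc24 t ht.1 htp; simp at this ⊢; omega
    · have := hc33 t (by omega) ht.2; simp at this ⊢; omega
  have hf3 : (PySem.List.pyRange c3 c1 1).filter (fun t => decide (pvPos v t ≤ ymax))
      = PySem.List.pyRange c3 c1 1 := by
    rw [List.filter_eq_self]
    intro t ht
    rw [PySem.List.mem_pyRange_one] at ht
    have := hc34 t ht.1 ht.2
    simpa using this
  have hR : pvBStep ymin ymax d v
      = (PySem.List.pyRange c3 c1 1).foldl (fun d s => pvUpd d s v)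
          ((PySem.List.pyRange 0 c2 1).foldl (fun d s => pvUpd d s v) d) := by
    simp only [pvBStep]
    rw [← hpeak, ← hhigh, ← hhiG, hs0, ha, hb]
  rw [hL, hsplit, hR]
  simp only [List.filter_append, hf1, hf2, hf3, List.foldl_nil, List.foldl_append]
lemma pvLoopA_of_pos (ymin ymax yspeed : Int) (hy : 0 < ymin) (fuel : Nat) (d : PySem.Dict Int (PySem.Set Int)) :
    pvLoopA ymin ymax yspeed fuel yspeed 0 0 d = d := by
  cases fuel with
  | zero => rfl
  | succ n =>
    rw [pvLoopA, if_neg (by intro h; omega), if_pos hy]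

-- ===== VERDICT (by name: the statement is the Claim_ definition above) =====
theorem find_y_steps_spec : Claim_equal_find_y_steps := by
  intro ymin ymax _
  unfold Spec_find_y_steps
  unfold find_y_steps find_y_steps_alt
  by_cases hy : ymin > 0
  · rw [if_pos hy]
    have hid : ∀ (l : List Int) (d : PySem.Dict Int (PySem.Set Int)),
        l.foldl (fun d yspeed => pvLoopA ymin ymax yspeed (pvFuelA ymin yspeed) yspeed 0 0 d) d = d := by
      intro l
      induction l with
      | nil => intro d; rfl
      | cons x xs ih =>
        intro d
        rw [List.foldl_cons, pvLoopA_of_pos ymin ymax x hy, ih]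
    rw [hid]
  · rw [if_neg hy]
    congr 1
    exact PySem.List.foldl_congr_mem _ _ _ _ (fun acc x _ => pvBody_eq ymin ymax x (by omega) acc)
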